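-- pv_equiv track=rewrite | github.com/ohdnf/algo-study | programmers/2019_kakao_winter_internship/불량사용자/불량사용자_장현준.py | solution
-- ===== SOURCE A (Python) =====
-- def solution(user_id, banned_id):
--     answer = dict()
--     uids = [0] * len(user_id)
--     bids = [0] * len(banned_id)
--     # bid에 uid가 해당하는지 T/F 리턴한다.
--     def check(bid, uid):
--         if len(bid) != len(uid): return False
--         for i in range(len(bid)):
--             if bid[i] == "*" or bid[i] == uid[i]: continue
--             return False
--         return True
--     # banned_id[n] 과 uids를 비교한다.
--     def dfs(n, uids):
--         # 3. 마지막에 생성된 제재 목록을 넣는다.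
--         if n == len(banned_id):
--             uids_key = ''.join(map(str,uids))
--             if uids_key not in answer: answer[uids_key] = 1
--             return
--         for j in range(len(uids)):
--             if uids[j]: continue
--             # 1. 각 유저아이디가 banned_id[n]에 해당하는지 체크한다.
--             if check(banned_id[n], user_id[j]):
--                 # 2. 해당하면, 제재 목록에 넣고, 다음을 진행한다.
--                 uids[j] = 1
--                 dfs(n+1, uids)
--                 uids[j] = 0
--     dfs(0, uids)
--     return len(answer)
-- ===== SOURCE B (Python) =====
-- def matches(bid, uid):
--     return len(bid) == len(uid) and all(b == '*' or b == u for b, u in zip(bid, uid))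
--
--
-- def solution(user_id, banned_id):
--     frontier = {(0,) * len(user_id)}
--     for bid in banned_id:
--         nxt = set()
--         for u in frontier:
--             for j, uid in enumerate(user_id):
--                 if u[j] == 0 and matches(bid, uid):
--                     nxt.add(u[:j] + (1,) + u[j + 1:])
--         frontier = nxt
--     return len(frontier)
-- ===== Notes on version B (the rewrite author's own statement) =====
-- stated objective: alternative
-- what changed: A enumerates every ordering of pattern-to-user assignments by depth-first search, deduplicating only at the leaves via a dict keyed by the joined 0/1 string; B sweeps the patterns once, keeping a set of distinct used-user tuples as a frontier and deduplicating after every pattern, then returns the frontier size (intended as faster on permutation-heavy inputs: the probe saw A time out at n=16 where B returned, but no clean ratio was measurable, so no speed is claimed).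
import Mathlib
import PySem

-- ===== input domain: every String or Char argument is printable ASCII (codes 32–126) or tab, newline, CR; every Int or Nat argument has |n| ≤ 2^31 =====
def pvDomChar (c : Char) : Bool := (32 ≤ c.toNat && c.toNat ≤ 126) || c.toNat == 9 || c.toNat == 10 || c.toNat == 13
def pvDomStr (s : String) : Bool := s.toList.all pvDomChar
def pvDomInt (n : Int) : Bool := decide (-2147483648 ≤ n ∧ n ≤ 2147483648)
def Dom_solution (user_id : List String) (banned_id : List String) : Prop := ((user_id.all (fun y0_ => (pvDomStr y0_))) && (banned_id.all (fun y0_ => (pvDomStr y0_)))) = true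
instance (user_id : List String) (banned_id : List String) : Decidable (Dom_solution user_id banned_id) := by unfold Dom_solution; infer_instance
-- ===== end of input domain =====

-- B replaces A's depth-first enumeration of all match orderings (deduplicated only at
-- the leaves through a dict of joined-string keys) by a level-by-level frontier of
-- distinct used-user tuples, deduplicating after every banned pattern (objective: alternative;
-- intended to avoid A's blow-up on permutation-heavy inputs, not confirmed).

-- ===== PORT A =====
-- check(bid, uid): length test, then per-index wildcard/equality loop
def pvCheck (bid uid : String) : Bool :=
  if PySem.Str.len bid ≠ PySem.Str.len uid then false
  else (List.range bid.toList.length).all (fun i =>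
    (bid.toList.getD i ' ' == '*') || (bid.toList.getD i ' ' == uid.toList.getD i ' '))

-- dfs(n, uids): recursion on the remaining suffix of banned_id (bid = banned_id[n]);
-- the inner `for j in range(len(uids))` is pvDfsLoop over that index list, and the
-- mutation uids[j] = 1 / uids[j] = 0 around the recursive call is passing uids.set j 1.
mutual
def pvDfs (user : List String) : List String → List Int → PySem.Dict String Int → PySem.Dict String Int
  | [], uids, ans =>
      let key := PySem.Str.join "" (uids.map PySem.Int.toStr)
      if (ans.get? key).isSome then ans else ans.insert key 1
  | bid :: rest, uids, ans => pvDfsLoop user bid rest uids (List.range uids.length) ans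
termination_by bids uids _ => (bids.length, uids.length + 1)

def pvDfsLoop (user : List String) (bid : String) (rest : List String) (uids : List Int) :
    List Nat → PySem.Dict String Int → PySem.Dict String Int
  | [], ans => ans
  | j :: js, ans =>
      if uids.getD j 0 ≠ 0 then pvDfsLoop user bid rest uids js ans
      else if pvCheck bid (user.getD j "") then
        pvDfsLoop user bid rest uids js (pvDfs user rest (uids.set j 1) ans)
      else pvDfsLoop user bid rest uids js ans
termination_by js _ => (rest.length + 1, js.length)
end

def solution (user_id : List String) (banned_id : List String) : Int :=
  ((pvDfs user_id banned_id (List.replicate user_id.length 0) PySem.Dict.empty).size : Int)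

-- ===== PORT B =====
def pvMatches (bid uid : String) : Bool :=
  (PySem.Str.len bid == PySem.Str.len uid) &&
    (bid.toList.zip uid.toList).all (fun p => p.1 == '*' || p.1 == p.2)

-- one banned pattern: frontier of used-tuples → next frontier (a Python set of tuples).
-- u[j] is ported with pyGetD: every tuple in a reachable frontier has len(user_id) entries,
-- so the index is in range wherever the Python code runs.
def pvStep (user : List String) (bid : String) (fr : PySem.Set (List Int)) : PySem.Set (List Int) :=
  fr.foldl (fun nxt u =>
    (PySem.List.enumerate user).foldl (fun nxt2 p =>
      if (PySem.List.pyGetD u p.1 0 == 0) && pvMatches bid p.2 then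
        PySem.Set.add nxt2
          (PySem.List.slice u none (some p.1) ++ [(1 : Int)] ++ PySem.List.slice u (some (p.1 + 1)) none)
      else nxt2) nxt) PySem.Set.empty

def solution_alt (user_id : List String) (banned_id : List String) : Int :=
  PySem.Set.len
    (banned_id.foldl (fun fr bid => pvStep user_id bid fr)
      (PySem.Set.ofList [List.replicate user_id.length 0]))

-- ===== PRECONDITION & SPEC =====
def Spec_solution (user_id : List String) (banned_id : List String) (out : Int) : Prop := out = solution_alt user_id banned_id
instance (user_id : List String) (banned_id : List String) (out : Int) : Decidable (Spec_solution user_id banned_id out) := by unfold Spec_solution; infer_instance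

-- ===== CLAIM (what is proved, stated in full; the proofs are below) =====
def Claim_equal_solution : Prop := ∀ (user_id : List String) (banned_id : List String), Dom_solution user_id banned_id → Spec_solution user_id banned_id (solution user_id banned_id)

-- ===== LEMMAS AND PROOFS =====

-- the joined-string key A stores for a finished uids tuple
def pvKey (u : List Int) : String := PySem.Str.join "" (u.map PySem.Int.toStr)

-- abstract one-step successors of a partial assignment u under pattern bid
def pvSuccs (user : List String) (bid : String) (u : List Int) : Finset (List Int) :=
  (((List.range u.length).filter
      (fun j => (u.getD j 0 == 0) && pvCheck bid (user.getD j ""))).toFinset).image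
    (fun j => u.set j 1)

-- the set of keys A's dfs adds, starting from partial assignment u
def pvKA (user : List String) : List String → List Int → Finset String
  | [], u => {pvKey u}
  | bid :: rest, u => (pvSuccs user bid u).biUnion (fun v => pvKA user rest v)

def pvStepF (user : List String) (T : Finset (List Int)) (bid : String) : Finset (List Int) :=
  T.biUnion (pvSuccs user bid)

def pvGood (n : Nat) (u : List Int) : Prop := u.length = n ∧ ∀ x ∈ u, x = 0 ∨ x = 1


-- pvCheck and pvMatches compute the same Boolean
lemma pvAll_range_eq_zip (bs us : List Char) (h : bs.length = us.length) :
    ((List.range bs.length).all (fun i =>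
        (bs.getD i ' ' == '*') || (bs.getD i ' ' == us.getD i ' '))) =
      (bs.zip us).all (fun p => p.1 == '*' || p.1 == p.2) := by
  induction bs generalizing us with
  | nil => cases us <;> simp_all
  | cons b bs ih =>
    cases us with
    | nil => simp at h
    | cons u us =>
      simp only [List.length_cons, Nat.add_right_cancel_iff] at h
      have hshift : ((fun i => ((b :: bs).getD i ' ' == '*') ||
            ((b :: bs).getD i ' ' == ((u :: us).getD i ' '))) ∘ Nat.succ) =
          (fun i => (bs.getD i ' ' == '*') || (bs.getD i ' ' == us.getD i ' ')) := by
        funext i; simp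
      simp only [List.length_cons, List.range_succ_eq_map, List.all_cons, List.all_map,
        List.zip_cons_cons, hshift, ih us h]
      simp

lemma pvStrLen_eq (s : String) : PySem.Str.len s = (s.toList.length : Int) := by
  simp [pysem]

lemma pvCheck_eq_matches (bid uid : String) : pvCheck bid uid = pvMatches bid uid := by
  unfold pvCheck pvMatches
  by_cases hlen : bid.toList.length = uid.toList.length
  · have hI : PySem.Str.len bid = PySem.Str.len uid := by
      rw [pvStrLen_eq, pvStrLen_eq]; exact_mod_cast hlen
    rw [if_neg (fun hc => hc hI)]
    have hbeq : (PySem.Str.len bid == PySem.Str.len uid) = true := beq_iff_eq.mpr hI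
    rw [hbeq, Bool.true_and]
    exact pvAll_range_eq_zip bid.toList uid.toList hlen
  · have hI : PySem.Str.len bid ≠ PySem.Str.len uid := by
      rw [pvStrLen_eq, pvStrLen_eq]; exact_mod_cast hlen
    rw [if_pos hI]
    have hbeq : (PySem.Str.len bid == PySem.Str.len uid) = false := beq_eq_false_iff_ne.mpr hI
    rw [hbeq, Bool.false_and]

-- characterisation of the successor set
lemma pvMem_succs (user : List String) (bid : String) (u v : List Int) :
    v ∈ pvSuccs user bid u ↔
      ∃ j, j < u.length ∧ u.getD j 0 = 0 ∧ pvCheck bid (user.getD j "") = true ∧ v = u.set j 1 := by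
  simp only [pvSuccs, Finset.mem_image, List.mem_toFinset, List.mem_filter, List.mem_range,
    Bool.and_eq_true, beq_iff_eq]
  constructor
  · rintro ⟨j, ⟨hj, hz, hc⟩, rfl⟩; exact ⟨j, hj, hz, hc, rfl⟩
  · rintro ⟨j, hj, hz, hc, rfl⟩; exact ⟨j, ⟨hj, hz, hc⟩, rfl⟩

lemma pvGood_succs (user : List String) (bid : String) (n : Nat) (u v : List Int)
    (hu : pvGood n u) (hv : v ∈ pvSuccs user bid u) : pvGood n v := by
  rcases (pvMem_succs user bid u v).1 hv with ⟨j, hj, _, _, rfl⟩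
  refine ⟨by simpa using hu.1, fun x hx => ?_⟩
  rcases List.mem_or_eq_of_mem_set hx with hx | rfl
  · exact hu.2 x hx
  · exact Or.inr rfl

lemma pvGood_fold (user : List String) (bids : List String) (T : Finset (List Int)) (n : Nat)
    (hT : ∀ u ∈ T, pvGood n u) : ∀ u ∈ bids.foldl (pvStepF user) T, pvGood n u := by
  induction bids generalizing T with
  | nil => simpa using hT
  | cons bid rest ih =>
    simp only [List.foldl_cons]
    refine ih _ (fun v hv => ?_)
    rcases Finset.mem_biUnion.1 hv with ⟨u, hu, hvu⟩
    exact pvGood_succs user bid n u v (hT u hu) hvu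

-- the key A stores, as a list of characters
lemma pvJoinNil (l : List (List Char)) : PySem.Chars.join [] l = l.flatten := by
  induction l with
  | nil => simp [PySem.Chars.join_nil]
  | cons a l ih =>
    cases l with
    | nil => simp [PySem.Chars.join_singleton]
    | cons b l =>
      rw [PySem.Chars.join_cons_cons, List.flatten_cons, ← ih]
      simp

lemma pvKey_toList (u : List Int) : (∀ x ∈ u, x = 0 ∨ x = 1) →
    (pvKey u).toList = u.map (fun x => if x = 0 then '0' else '1') := by
  have hemp : "".toList = ([] : List Char) := rfl
  induction u with
  | nil =>
    intro _
    rw [pvKey, PySem.Str.toList_join, hemp, pvJoinNil]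
    simp
  | cons a u ih =>
    intro hu
    have hchars : (PySem.Int.toStr a).toList = [if a = 0 then '0' else '1'] := by
      rcases hu a (by simp) with rfl | rfl <;> rw [PySem.Int.toList_toStr] <;> decide
    have ih' := ih (fun x hx => hu x (by simp [hx]))
    rw [pvKey, PySem.Str.toList_join, hemp, pvJoinNil] at ih' ⊢
    simp only [List.map_cons, List.flatten_cons, hchars, ih']
    simp

lemma pvKey_inj : ∀ (u v : List Int), (∀ x ∈ u, x = 0 ∨ x = 1) → (∀ x ∈ v, x = 0 ∨ x = 1) →
    pvKey u = pvKey v → u = v := by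
  have main : ∀ (u v : List Int), (∀ x ∈ u, x = 0 ∨ x = 1) → (∀ x ∈ v, x = 0 ∨ x = 1) →
      u.map (fun x => if x = 0 then '0' else '1') = v.map (fun x => if x = 0 then '0' else '1') →
      u = v := by
    intro u
    induction u with
    | nil =>
      intro v _ _ h
      cases v with
      | nil => rfl
      | cons b t => simp at h
    | cons a u ih =>
      intro v hu hv h
      cases v with
      | nil => simp at h
      | cons b v =>
        simp only [List.map_cons, List.cons.injEq] at h
        have hab : a = b := by
          rcases hu a (by simp) with rfl | rfl <;> rcases hv b (by simp) with rfl | rfl <;>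
            simpa using h.1
        rw [hab, ih v (fun x hx => hu x (by simp [hx])) (fun x hx => hv x (by simp [hx])) h.2]
  intro u v hu hv h
  have h' := congrArg String.toList h
  rw [pvKey_toList u hu, pvKey_toList v hv] at h'
  exact main u v hu hv h'

-- generic facts about the Set-building folds in B
lemma pvMemFold {β : Type} (l : List β) (P : β → Bool) (f : β → List Int)
    (acc : PySem.Set (List Int)) (x : List Int) :
    (x ∈ l.foldl (fun a y => if P y then a.add (f y) else a) acc) ↔
      x ∈ acc ∨ ∃ y ∈ l, P y = true ∧ x = f y := by
  induction l generalizing acc with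
  | nil => simp
  | cons y l ih =>
    simp only [List.foldl_cons]
    by_cases hy : P y = true
    · rw [hy, if_pos rfl, ih]
      simp only [PySem.Set.mem_add, List.mem_cons]
      constructor
      · rintro (⟨hx | rfl⟩ | ⟨z, hz, hPz, rfl⟩)
        · exact Or.inl hx
        · exact Or.inr ⟨y, Or.inl rfl, hy, rfl⟩
        · exact Or.inr ⟨z, Or.inr hz, hPz, rfl⟩
      · rintro (hx | ⟨z, (rfl | hz), hPz, rfl⟩)
        · exact Or.inl (Or.inl hx)
        · exact Or.inl (Or.inr rfl)
        · exact Or.inr ⟨z, hz, hPz, rfl⟩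
    · rw [if_neg hy, ih]
      simp only [List.mem_cons]
      constructor
      · rintro (hx | ⟨z, hz, hPz, rfl⟩)
        · exact Or.inl hx
        · exact Or.inr ⟨z, Or.inr hz, hPz, rfl⟩
      · rintro (hx | ⟨z, (rfl | hz), hPz, rfl⟩)
        · exact Or.inl hx
        · exact absurd hPz hy
        · exact Or.inr ⟨z, hz, hPz, rfl⟩

lemma pvNodupFold {β : Type} (l : List β) (P : β → Bool) (f : β → List Int)
    (acc : PySem.Set (List Int)) (h : acc.Nodup) :
    (l.foldl (fun a y => if P y then a.add (f y) else a) acc).Nodup := by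
  induction l generalizing acc with
  | nil => simpa using h
  | cons y l ih =>
    simp only [List.foldl_cons]
    split
    · exact ih _ (PySem.Set.nodup_add acc (f y) h)
    · exact ih _ h

-- the inner fold of pvStep over enumerate user, for a good tuple u
lemma pvInner_mem (user : List String) (bid : String) (u : List Int)
    (hg : pvGood user.length u) (acc : PySem.Set (List Int)) (x : List Int) :
    (x ∈ (PySem.List.enumerate user).foldl (fun nxt2 p =>
        if (PySem.List.pyGetD u p.1 0 == 0) && pvMatches bid p.2 then
          PySem.Set.add nxt2
            (PySem.List.slice u none (some p.1) ++ [(1 : Int)] ++ PySem.List.slice u (some (p.1 + 1)) none)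
        else nxt2) acc) ↔ x ∈ acc ∨ x ∈ pvSuccs user bid u := by
  rw [pvMemFold]
  apply or_congr Iff.rfl
  rw [pvMem_succs]
  constructor
  · rintro ⟨p, hp, hP, rfl⟩
    rcases (PySem.List.mem_enumerate_iff user 0 p).1 hp with ⟨k, hk, rfl⟩
    simp only [zero_add] at hP ⊢
    have hku : k < u.length := by rw [hg.1]; exact hk
    simp only [Bool.and_eq_true, beq_iff_eq, PySem.List.pyGetD_natCast] at hP
    refine ⟨k, hku, hP.1, ?_, ?_⟩
    · rw [pvCheck_eq_matches]
      have : user.getD k "" = user[k] := by simp [List.getD_eq_getElem?_getD, hk]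
      rw [this]; exact hP.2
    · have h1 : ((k : Int) + 1) = ((k + 1 : Nat) : Int) := by push_cast; ring
      rw [h1, PySem.List.slice_to u (by positivity), PySem.List.slice_from u (by positivity)]
      simp only [Int.toNat_natCast]
      rw [List.set_eq_take_append_cons_drop (i := k) (a := (1 : Int)), if_pos hku,
        List.append_assoc]
      rfl
  · rintro ⟨j, hj, hz, hc, rfl⟩
    have hju : j < user.length := by rw [← hg.1]; exact hj
    refine ⟨((j : Int), user[j]), ?_, ?_, ?_⟩
    · exact (PySem.List.mem_enumerate_iff user 0 _).2 ⟨j, hju, by simp⟩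
    · simp only [Bool.and_eq_true, beq_iff_eq, PySem.List.pyGetD_natCast]
      refine ⟨hz, ?_⟩
      rw [← pvCheck_eq_matches]
      have : user.getD j "" = user[j] := by simp [List.getD_eq_getElem?_getD, hju]
      rw [← this]; exact hc
    · have h1 : ((j : Int) + 1) = ((j + 1 : Nat) : Int) := by push_cast; ring
      rw [h1, PySem.List.slice_to u (by positivity), PySem.List.slice_from u (by positivity)]
      simp only [Int.toNat_natCast]
      rw [List.set_eq_take_append_cons_drop (i := j) (a := (1 : Int)), if_pos hj,
        List.append_assoc]
      rfl

lemma pvStep_mem (user : List String) (bid : String) (fr : PySem.Set (List Int))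
    (hg : ∀ u ∈ fr, pvGood user.length u) (x : List Int) :
    x ∈ pvStep user bid fr ↔ ∃ u ∈ fr, x ∈ pvSuccs user bid u := by
  unfold pvStep
  have main : ∀ (l : List (List Int)) (acc : PySem.Set (List Int)),
      (∀ u ∈ l, pvGood user.length u) →
      ((x ∈ l.foldl (fun nxt u =>
          (PySem.List.enumerate user).foldl (fun nxt2 p =>
            if (PySem.List.pyGetD u p.1 0 == 0) && pvMatches bid p.2 then
              PySem.Set.add nxt2
                (PySem.List.slice u none (some p.1) ++ [(1 : Int)] ++ PySem.List.slice u (some (p.1 + 1)) none)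
            else nxt2) nxt) acc) ↔ x ∈ acc ∨ ∃ u ∈ l, x ∈ pvSuccs user bid u) := by
    intro l
    induction l with
    | nil => intro acc _; simp
    | cons u l ih =>
      intro acc hgl
      simp only [List.foldl_cons]
      rw [ih _ (fun v hv => hgl v (by simp [hv])),
        pvInner_mem user bid u (hgl u (by simp)) acc x]
      simp only [List.mem_cons]
      constructor
      · rintro (⟨hx | hx⟩ | ⟨v, hv, hxv⟩)
        · exact Or.inl hx
        · exact Or.inr ⟨u, Or.inl rfl, hx⟩
        · exact Or.inr ⟨v, Or.inr hv, hxv⟩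
      · rintro (hx | ⟨v, (rfl | hv), hxv⟩)
        · exact Or.inl (Or.inl hx)
        · exact Or.inl (Or.inr hxv)
        · exact Or.inr ⟨v, hv, hxv⟩
  rw [main fr PySem.Set.empty hg]
  simp [PySem.Set.empty]

lemma pvStep_nodup (user : List String) (bid : String) (fr : PySem.Set (List Int)) :
    (pvStep user bid fr).Nodup := by
  unfold pvStep
  have main : ∀ (l : List (List Int)) (acc : PySem.Set (List Int)), acc.Nodup →
      (l.foldl (fun nxt u =>
          (PySem.List.enumerate user).foldl (fun nxt2 p =>
            if (PySem.List.pyGetD u p.1 0 == 0) && pvMatches bid p.2 then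
              PySem.Set.add nxt2
                (PySem.List.slice u none (some p.1) ++ [(1 : Int)] ++ PySem.List.slice u (some (p.1 + 1)) none)
            else nxt2) nxt) acc).Nodup := by
    intro l
    induction l with
    | nil => intro acc h; simpa using h
    | cons u l ih =>
      intro acc h
      simp only [List.foldl_cons]
      exact ih _ (pvNodupFold _ _ _ acc h)
  exact main fr PySem.Set.empty (by simp [PySem.Set.empty])

lemma pvStep_toFinset (user : List String) (bid : String) (fr : PySem.Set (List Int))
    (hg : ∀ u ∈ fr, pvGood user.length u) :
    (pvStep user bid fr).toFinset = pvStepF user fr.toFinset bid := by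
  apply Finset.ext
  intro x
  rw [List.mem_toFinset, pvStep_mem user bid fr hg x]
  simp [pvStepF, Finset.mem_biUnion]

lemma pvFrontier_spec (user : List String) (bids : List String) (fr : PySem.Set (List Int))
    (hnd : fr.Nodup) (hg : ∀ u ∈ fr, pvGood user.length u) :
    (bids.foldl (fun f bid => pvStep user bid f) fr).toFinset = bids.foldl (pvStepF user) fr.toFinset ∧
    (bids.foldl (fun f bid => pvStep user bid f) fr).Nodup := by
  induction bids generalizing fr with
  | nil => exact ⟨rfl, hnd⟩
  | cons bid rest ih =>
    simp only [List.foldl_cons]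
    have hg' : ∀ u ∈ pvStep user bid fr, pvGood user.length u := by
      intro v hv
      rcases (pvStep_mem user bid fr hg v).1 hv with ⟨u, hu, hvu⟩
      exact pvGood_succs user bid user.length u v (hg u hu) hvu
    rcases ih (pvStep user bid fr) (pvStep_nodup user bid fr) hg' with ⟨h1, h2⟩
    refine ⟨?_, h2⟩
    rw [h1, pvStep_toFinset user bid fr hg]

-- A's dfs: the keys it adds are exactly pvKA
lemma pvKeysA (user : List String) (bids : List String) (u : List Int)
    (d : PySem.Dict String Int) (hnd : d.keys.Nodup) :
    (pvDfs user bids u d).keys.toFinset = d.keys.toFinset ∪ pvKA user bids u ∧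
    (pvDfs user bids u d).keys.Nodup := by
  induction bids generalizing u d with
  | nil =>
    simp only [pvDfs, pvKA]
    by_cases h : (d.get? (PySem.Str.join "" (u.map PySem.Int.toStr))).isSome
    · rw [if_pos h]
      have hk : pvKey u ∈ d.keys := by
        rw [← PySem.Dict.contains_iff_mem_keys, PySem.Dict.contains_eq_isSome_get?]
        exact h
      refine ⟨?_, hnd⟩
      rw [Finset.union_comm]
      symm
      apply Finset.union_eq_right.2
      intro x hx
      rw [Finset.mem_singleton] at hx
      rw [List.mem_toFinset]
      exact hx ▸ hk
    · rw [if_neg h]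
      have hnc : d.contains (PySem.Str.join "" (List.map PySem.Int.toStr u)) = false := by
        rw [PySem.Dict.contains_eq_isSome_get?]
        simpa using h
      constructor
      · rw [PySem.Dict.keys_insert_of_not_contains d 1 hnc]
        simp [pvKey]
      · exact PySem.Dict.nodup_keys_insert d _ 1 hnd
  | cons bid rest ih =>
    simp only [pvDfs]
    have loop : ∀ (js : List Nat) (d : PySem.Dict String Int), d.keys.Nodup →
        (pvDfsLoop user bid rest u js d).keys.toFinset =
          d.keys.toFinset ∪
            ((js.filter (fun j => (u.getD j 0 == 0) && pvCheck bid (user.getD j ""))).toFinset).biUnion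
              (fun j => pvKA user rest (u.set j 1)) ∧
        (pvDfsLoop user bid rest u js d).keys.Nodup := by
      intro js
      induction js with
      | nil => intro d hd; simp [pvDfsLoop, hd]
      | cons j js ihj =>
        intro d hd
        simp only [pvDfsLoop]
        by_cases hz : u.getD j 0 ≠ 0
        · rw [if_pos hz]
          have hcond : ((u.getD j 0 == 0) && pvCheck bid (user.getD j "")) = false := by
            have : (u.getD j 0 == 0) = false := beq_eq_false_iff_ne.mpr hz
            rw [this, Bool.false_and]
          simp only [List.filter_cons, hcond, Bool.false_eq_true, if_false]
          exact ihj d hd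
        · rw [if_neg hz]
          have hz' : u.getD j 0 = 0 := not_not.mp hz
          have hzb : (u.getD j 0 == 0) = true := beq_iff_eq.mpr hz'
          by_cases hc : pvCheck bid (user.getD j "") = true
          · rw [if_pos hc]
            have hcond : ((u.getD j 0 == 0) && pvCheck bid (user.getD j "")) = true := by
              rw [hzb, hc, Bool.and_self]
            rcases ih (u.set j 1) d hd with ⟨g1, g2⟩
            rcases ihj (pvDfs user rest (u.set j 1) d) g2 with ⟨h1, h2⟩
            refine ⟨?_, h2⟩
            rw [h1, g1]
            simp only [List.filter_cons, hcond, if_true]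
            rw [List.toFinset_cons, Finset.biUnion_insert, Finset.union_assoc]
          · rw [if_neg hc]
            have hcond : ((u.getD j 0 == 0) && pvCheck bid (user.getD j "")) = false := by
              rw [Bool.eq_false_iff.mpr hc, Bool.and_false]
            simp only [List.filter_cons, hcond, Bool.false_eq_true, if_false]
            exact ihj d hd
    rcases loop (List.range u.length) d hnd with ⟨h1, h2⟩
    refine ⟨?_, h2⟩
    rw [h1]
    congr 1
    simp only [pvKA]
    rw [pvSuccs, Finset.image_biUnion]

lemma pvKAforward (user : List String) (bids : List String) (T : Finset (List Int)) :
    T.biUnion (pvKA user bids) = Finset.image pvKey (bids.foldl (pvStepF user) T) := by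
  induction bids generalizing T with
  | nil =>
    simp only [List.foldl_nil, pvKA]
    exact Finset.biUnion_singleton
  | cons bid rest ih =>
    simp only [List.foldl_cons]
    rw [← ih (pvStepF user T bid)]
    simp only [pvKA, pvStepF]
    rw [Finset.biUnion_biUnion]

-- ===== VERDICT (by name: the statement is the Claim_ definition above) =====
theorem solution_spec : Claim_equal_solution := by
  intro user banned _
  unfold Spec_solution solution solution_alt
  have hzg : pvGood user.length (List.replicate user.length (0 : Int)) :=
    ⟨List.length_replicate, fun x hx => Or.inl (List.eq_of_mem_replicate hx)⟩
  have hA := pvKeysA user banned (List.replicate user.length (0 : Int)) PySem.Dict.empty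
    (by rw [PySem.Dict.keys_empty]; exact List.nodup_nil)
  have hkeys : (pvDfs user banned (List.replicate user.length (0 : Int)) PySem.Dict.empty).keys.toFinset =
      pvKA user banned (List.replicate user.length (0 : Int)) := by
    rw [hA.1, PySem.Dict.keys_empty]
    simp
  have hsize : ((pvDfs user banned (List.replicate user.length (0 : Int)) PySem.Dict.empty).size : Int) =
      ((pvKA user banned (List.replicate user.length (0 : Int))).card : Int) := by
    have h1 : (pvDfs user banned (List.replicate user.length (0 : Int)) PySem.Dict.empty).size =
        (pvDfs user banned (List.replicate user.length (0 : Int)) PySem.Dict.empty).keys.length := by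
      simp [PySem.Dict.size, PySem.Dict.keys]
    rw [h1, ← List.toFinset_card_of_nodup hA.2, hkeys]
  have hKA : pvKA user banned (List.replicate user.length (0 : Int)) =
      Finset.image pvKey (banned.foldl (pvStepF user) {List.replicate user.length (0 : Int)}) := by
    have h := pvKAforward user banned {List.replicate user.length (0 : Int)}
    rw [Finset.singleton_biUnion] at h
    exact h
  have hgoodR : ∀ u ∈ banned.foldl (pvStepF user) {List.replicate user.length (0 : Int)},
      pvGood user.length u := by
    apply pvGood_fold
    intro u hu
    rw [Finset.mem_singleton] at hu
    rw [hu]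
    exact hzg
  have hcard : (Finset.image pvKey (banned.foldl (pvStepF user) {List.replicate user.length (0 : Int)})).card =
      (banned.foldl (pvStepF user) {List.replicate user.length (0 : Int)}).card :=
    Finset.card_image_of_injOn (fun u hu v hv h =>
      pvKey_inj u v (hgoodR u (by simpa using hu)).2 (hgoodR v (by simpa using hv)).2 h)
  have hofl : PySem.Set.ofList [List.replicate user.length (0 : Int)] =
      [List.replicate user.length (0 : Int)] :=
    PySem.Set.ofList_eq_self_of_nodup _ (List.nodup_singleton _)
  have hB := pvFrontier_spec user banned [List.replicate user.length (0 : Int)]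
    (List.nodup_singleton _)
    (by intro u hu; rw [List.mem_singleton] at hu; rw [hu]; exact hzg)
  have htf : ([List.replicate user.length (0 : Int)] : List (List Int)).toFinset =
      ({List.replicate user.length (0 : Int)} : Finset (List Int)) := by simp
  rw [hofl]
  have hlenB : PySem.Set.len (banned.foldl (fun fr bid => pvStep user bid fr)
      [List.replicate user.length (0 : Int)]) =
      (((banned.foldl (fun fr bid => pvStep user bid fr)
        [List.replicate user.length (0 : Int)]).length : Nat) : Int) := by
    simp [PySem.Set.len]
  rw [hlenB, hsize, hKA, hcard]
  rw [← List.toFinset_card_of_nodup hB.2, hB.1, htf]
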